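-- pv_equiv track=rewrite | github.com/veeravivekt/Leetcode-Solutions-Python | Leetcode Daily/2025/Jan/2657_Find_the_Prefix_Common_Array_of_Two_Arrays.py | findThePrefixCommonArray
-- ===== SOURCE A (Python) =====
-- from typing import List
--
-- def findThePrefixCommonArray(A: List[int], B: List[int]) -> List[int]:
--     """
--     A = [1,3,2,4]
--     B = [3,1,2,4]
--     [0 , 2(1, 3), 3(1, 2, 3), 4(1, 2, 3, 4)]
--     """
--     result = [0] * len(A)
--     setA = set()
--     for i in range(len(A)):
--         setA.add(A[i])
--         count = 0
--         for j in range(i + 1):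
--             if B[j] in setA:
--                 count += 1
--         result[i] = count
--     return result
-- ===== SOURCE B (Python) =====
-- from typing import List
--
-- def findThePrefixCommonArray(A: List[int], B: List[int]) -> List[int]:
--     seen = set()
--     cntB = {}
--     common = 0
--     res = []
--     for a, b in zip(A, B):
--         if a not in seen:
--             common += cntB.get(a, 0)
--             seen.add(a)
--         if b in seen:
--             common += 1
--         cntB[b] = cntB.get(b, 0) + 1
--         res.append(common)
--     return res
-- ===== Notes on version B (the rewrite author's own statement) =====
-- stated objective: faster
-- what changed: Replaced the rescan of the whole B-prefix at every index by a single pass that maintains the seen-set of A, a counter of B's prefix and a running common count, updated incrementally per step.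
import Mathlib
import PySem

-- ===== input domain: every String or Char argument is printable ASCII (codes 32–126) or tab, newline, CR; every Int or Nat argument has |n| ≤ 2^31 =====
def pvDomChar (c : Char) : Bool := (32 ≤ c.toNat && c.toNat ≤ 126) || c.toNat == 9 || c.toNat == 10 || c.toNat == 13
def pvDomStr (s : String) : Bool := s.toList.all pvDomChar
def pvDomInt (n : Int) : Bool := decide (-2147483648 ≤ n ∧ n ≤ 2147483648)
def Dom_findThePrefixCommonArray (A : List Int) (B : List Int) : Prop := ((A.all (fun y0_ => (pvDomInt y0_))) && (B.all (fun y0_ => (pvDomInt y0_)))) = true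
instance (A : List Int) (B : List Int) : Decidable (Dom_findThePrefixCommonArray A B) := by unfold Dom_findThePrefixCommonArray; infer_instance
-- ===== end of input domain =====

-- B replaces A's quadratic rescan of the B-prefix by a single incremental pass (seen-set, prefix counter, running count); return-value equivalence on len(A) ≤ len(B).

-- ===== PORT A =====
def findThePrefixCommonArray (A : List Int) (B : List Int) : List Int :=
  let result := List.replicate A.length (0 : Int)
  let st :=
    (PySem.List.pyRange 0 (A.length : Int) 1).foldl
      (fun (st : PySem.Set Int × List Int) i =>
        let setA := PySem.Set.add st.1 (PySem.List.pyGetD A i 0)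
        let count :=
          (PySem.List.pyRange 0 (i + 1) 1).foldl
            (fun (c : Int) j =>
              if PySem.List.pyGetD B j 0 ∈ setA then c + 1 else c) 0
        (setA, st.2.set i.toNat count))
      (PySem.Set.ofList [], result)
  st.2

-- ===== PORT B =====
def findThePrefixCommonArray_alt (A : List Int) (B : List Int) : List Int :=
  let st :=
    (A.zip B).foldl
      (fun (st : PySem.Set Int × PySem.Dict Int Int × Int × List Int) p =>
        let seen := st.1
        let cntB := st.2.1
        let common := st.2.2.1
        let res := st.2.2.2
        let sc : PySem.Set Int × Int :=
          if p.1 ∈ seen then (seen, common)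
          else (PySem.Set.add seen p.1, common + cntB.getD p.1 0)
        let common2 := if p.2 ∈ sc.1 then sc.2 + 1 else sc.2
        (sc.1, cntB.insert p.2 (cntB.getD p.2 0 + 1), common2, res ++ [common2]))
      (PySem.Set.ofList [], PySem.Dict.empty, 0, [])
  st.2.2.2

-- ===== PRECONDITION & SPEC =====
-- A indexes B at every position of A, so it raises IndexError when len(B) < len(A); Pre_ excludes exactly those inputs.
def Pre_findThePrefixCommonArray (A : List Int) (B : List Int) : Prop := A.length ≤ B.length
instance (A : List Int) (B : List Int) : Decidable (Pre_findThePrefixCommonArray A B) := by unfold Pre_findThePrefixCommonArray; infer_instance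
def pvWitness_findThePrefixCommonArray : List Int × List Int := ([1, 3, 2, 4], [3, 1, 2, 4])

def Spec_findThePrefixCommonArray (A : List Int) (B : List Int) (out : List Int) : Prop := out = findThePrefixCommonArray_alt A B
instance (A : List Int) (B : List Int) (out : List Int) : Decidable (Spec_findThePrefixCommonArray A B out) := by unfold Spec_findThePrefixCommonArray; infer_instance

-- ===== CLAIM (what is proved, stated in full; the proofs are below) =====
def Claim_equal_findThePrefixCommonArray : Prop := ∀ (A : List Int) (B : List Int), Dom_findThePrefixCommonArray A B → Pre_findThePrefixCommonArray A B → Spec_findThePrefixCommonArray A B (findThePrefixCommonArray A B)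

-- ===== LEMMAS AND PROOFS =====

-- the common value both loops compute at index i: how many of B's first i+1 entries lie among A's first i+1 entries
def pvG (A B : List Int) (i : Nat) : Int :=
  (((B.take (i + 1)).countP (fun b => decide (b ∈ A.take (i + 1)))) : Int)


theorem pv_zip_take (A B : List Int) : A.zip B = A.zip (B.take A.length) := by
  induction A generalizing B with
  | nil => simp
  | cons a t ih =>
    cases B with
    | nil => simp
    | cons b u => simp [List.zip_cons_cons, ih u]

theorem pv_countP_append_singleton (l s : List Int) (x : Int) (hx : x ∉ s) :
    l.countP (fun b => decide (b ∈ s ++ [x]))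
      = l.countP (fun b => decide (b ∈ s)) + l.count x := by
  induction l with
  | nil => simp
  | cons y t ih =>
    simp only [List.countP_cons, List.count_cons, ih]
    by_cases hy : y ∈ s
    · have : y ≠ x := fun h => hx (h ▸ hy)
      simp [hy, this]; omega
    · by_cases hyx : y = x
      · subst hyx; simp [hx]; omega
      · simp [hy, hyx]

theorem pv_set_append {α} (xs : List α) (v d : α) (t : List α) :
    (xs ++ d :: t).set xs.length v = xs ++ v :: t := by
  induction xs with
  | nil => simp
  | cons a r ih => simp [ih]

theorem pv_inner (B : List Int) (s : PySem.Set Int) (m : Nat) (hm : m ≤ B.length) :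
    (PySem.List.pyRange 0 (m : Int) 1).foldl
      (fun (c : Int) j => if PySem.List.pyGetD B j 0 ∈ s then c + 1 else c) 0
    = (((B.take m).countP (fun b => decide (b ∈ s))) : Int) := by
  induction m with
  | zero => simp [PySem.List.pyRange_one_eq_nil]
  | succ m ih =>
    have hm' : m < B.length := hm
    have h1 : ((m + 1 : Nat) : Int) = (m : Int) + 1 := by push_cast; ring
    rw [h1, PySem.List.pyRange_one_succ_right (by positivity), List.foldl_append]
    rw [ih (le_of_lt hm')]
    have hg : PySem.List.pyGetD B (m : Int) 0 = B[m] := by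
      rw [PySem.List.pyGetD_natCast]
      exact List.getD_eq_getElem B 0 hm'
    rw [List.take_succ_eq_append_getElem hm']
    simp only [List.foldl_cons, List.foldl_nil, hg, List.countP_append, List.countP_singleton]
    by_cases h : B[m] ∈ s <;> simp [h]

theorem pv_step (A B : List Int) (k : Nat) (hA : k < A.length) (hB : k < B.length) :
    pvG A B k
      = (((B.take k).countP (fun b => decide (b ∈ A.take k))) : Int)
        + (if A[k] ∈ A.take k then 0 else ((B.take k).count A[k] : Int))
        + (if B[k] ∈ A.take (k + 1) then 1 else 0) := by
  unfold pvG
  rw [List.take_succ_eq_append_getElem hB, List.countP_append, List.countP_singleton]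
  have hmid : (B.take k).countP (fun b => decide (b ∈ A.take (k + 1)))
      = (B.take k).countP (fun b => decide (b ∈ A.take k))
        + (if A[k] ∈ A.take k then 0 else (B.take k).count A[k]) := by
    by_cases h : A[k] ∈ A.take k
    · rw [if_pos h, Nat.add_zero]
      apply List.countP_congr
      intro b _
      simp only [List.take_succ_eq_append_getElem hA, List.mem_append,
        List.mem_singleton]
      by_cases hb : b = A[k] <;> simp [hb, h]
    · rw [if_neg h, List.take_succ_eq_append_getElem hA,
        pv_countP_append_singleton _ _ _ h]
  rw [hmid]
  by_cases hc1 : A[k] ∈ A.take k <;> by_cases hc2 : B[k] ∈ A.take (k + 1) <;>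
    simp [hc1, hc2]

theorem pv_foldA (A B : List Int) (hAB : A.length ≤ B.length) (k : Nat) (hk : k ≤ A.length) :
    (PySem.List.pyRange 0 (k : Int) 1).foldl
      (fun (st : PySem.Set Int × List Int) i =>
        let setA := PySem.Set.add st.1 (PySem.List.pyGetD A i 0)
        let count :=
          (PySem.List.pyRange 0 (i + 1) 1).foldl
            (fun (c : Int) j =>
              if PySem.List.pyGetD B j 0 ∈ setA then c + 1 else c) 0
        (setA, st.2.set i.toNat count))
      (PySem.Set.ofList [], List.replicate A.length (0 : Int))
    = (PySem.Set.ofList (A.take k),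
       (List.range k).map (pvG A B) ++ List.replicate (A.length - k) (0 : Int)) := by
  induction k with
  | zero => simp [PySem.List.pyRange_one_eq_nil]
  | succ k ih =>
    have hkA : k < A.length := hk
    have hkB : k < B.length := lt_of_lt_of_le hkA hAB
    have h1 : ((k + 1 : Nat) : Int) = (k : Int) + 1 := by push_cast; ring
    rw [h1, PySem.List.pyRange_one_succ_right (by positivity), List.foldl_append,
      ih (le_of_lt hkA)]
    simp only [List.foldl_cons, List.foldl_nil]
    have hgA : PySem.List.pyGetD A (k : Int) 0 = A[k] := by
      rw [PySem.List.pyGetD_natCast]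
      exact List.getD_eq_getElem A 0 hkA
    have hset : PySem.Set.add (PySem.Set.ofList (A.take k)) (PySem.List.pyGetD A (k : Int) 0)
        = PySem.Set.ofList (A.take (k + 1)) := by
      rw [hgA, ← PySem.Set.ofList_append_singleton, ← List.take_succ_eq_append_getElem hkA]
    rw [hset]
    have hcnt : (PySem.List.pyRange 0 ((k : Int) + 1) 1).foldl
        (fun (c : Int) j =>
          if PySem.List.pyGetD B j 0 ∈ PySem.Set.ofList (A.take (k + 1)) then c + 1 else c) 0
        = pvG A B k := by
      rw [← h1, pv_inner B _ (k + 1) hkB]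
      unfold pvG
      congr 1
      apply List.countP_congr
      intro b _
      simp [PySem.Set.mem_ofList]
    rw [hcnt]
    have htoNat : ((k : Int)).toNat = k := Int.toNat_natCast k
    have hrep : List.replicate (A.length - k) (0 : Int)
        = (0 : Int) :: List.replicate (A.length - (k + 1)) (0 : Int) := by
      rw [← List.replicate_succ]
      congr 1
      omega
    rw [htoNat, hrep]
    have hlen : ((List.range k).map (pvG A B)).length = k := by simp
    refine congrArg _ ?_
    have hs := pv_set_append ((List.range k).map (pvG A B)) (pvG A B k) 0
      (List.replicate (A.length - (k + 1)) (0 : Int))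
    rw [hlen] at hs
    rw [hs, List.range_succ, List.map_append]
    simp

theorem pv_foldB (A B : List Int) (hAB : A.length ≤ B.length) (k : Nat) (hk : k ≤ A.length) :
    ((A.take k).zip (B.take k)).foldl
      (fun (st : PySem.Set Int × PySem.Dict Int Int × Int × List Int) p =>
        let seen := st.1
        let cntB := st.2.1
        let common := st.2.2.1
        let res := st.2.2.2
        let sc : PySem.Set Int × Int :=
          if p.1 ∈ seen then (seen, common)
          else (PySem.Set.add seen p.1, common + cntB.getD p.1 0)
        let common2 := if p.2 ∈ sc.1 then sc.2 + 1 else sc.2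
        (sc.1, cntB.insert p.2 (cntB.getD p.2 0 + 1), common2, res ++ [common2]))
      (PySem.Set.ofList [], PySem.Dict.empty, 0, [])
    = (PySem.Set.ofList (A.take k),
       PySem.Dict.counter (B.take k),
       (((B.take k).countP (fun b => decide (b ∈ A.take k))) : Int),
       (List.range k).map (pvG A B)) := by
  induction k with
  | zero => simp [PySem.Dict.counter]
  | succ k ih =>
    have hkA : k < A.length := hk
    have hkB : k < B.length := lt_of_lt_of_le hkA hAB
    have hzip : (A.take (k + 1)).zip (B.take (k + 1))
        = (A.take k).zip (B.take k) ++ [(A[k], B[k])] := by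
      rw [List.take_succ_eq_append_getElem hkA, List.take_succ_eq_append_getElem hkB,
        List.zip_append (by simp [List.length_take, hkA.le, hkB.le])]
      rfl
    rw [hzip, List.foldl_append, ih (le_of_lt hkA)]
    simp only [List.foldl_cons, List.foldl_nil]
    have hseen : ∀ x : Int, (x ∈ PySem.Set.ofList (A.take k)) ↔ x ∈ A.take k :=
      fun x => PySem.Set.mem_ofList _ _
    have hsc1 : (if A[k] ∈ PySem.Set.ofList (A.take k)
          then (PySem.Set.ofList (A.take k),
                (((B.take k).countP (fun b => decide (b ∈ A.take k))) : Int))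
          else (PySem.Set.add (PySem.Set.ofList (A.take k)) A[k],
                (((B.take k).countP (fun b => decide (b ∈ A.take k))) : Int)
                  + (PySem.Dict.counter (B.take k)).getD A[k] 0))
        = (PySem.Set.ofList (A.take (k + 1)),
           (((B.take k).countP (fun b => decide (b ∈ A.take k))) : Int)
             + (if A[k] ∈ A.take k then 0 else ((B.take k).count A[k] : Int))) := by
      by_cases h : A[k] ∈ A.take k
      · rw [if_pos ((hseen _).mpr h), if_pos h]
        refine congrArg₂ _ ?_ (by ring)
        rw [List.take_succ_eq_append_getElem hkA, PySem.Set.ofList_append_singleton,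
          PySem.Set.add_of_mem ((hseen _).mpr h)]
      · rw [if_neg (fun hc => h ((hseen _).mp hc)), if_neg h]
        refine congrArg₂ _ ?_ ?_
        · rw [List.take_succ_eq_append_getElem hkA, PySem.Set.ofList_append_singleton]
        · rw [PySem.Dict.getD_counter]
    rw [hsc1]
    have hdict : (PySem.Dict.counter (B.take k)).insert B[k]
          ((PySem.Dict.counter (B.take k)).getD B[k] 0 + 1)
        = PySem.Dict.counter (B.take (k + 1)) := by
      rw [List.take_succ_eq_append_getElem hkB,
        ← PySem.Dict.foldl_insert_getD_add_one_eq_counter,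
        ← PySem.Dict.foldl_insert_getD_add_one_eq_counter, List.foldl_append]
      rfl
    have hmem2 : (B[k] ∈ PySem.Set.ofList (A.take (k + 1))) ↔ B[k] ∈ A.take (k + 1) :=
      PySem.Set.mem_ofList _ _
    have hcommon2 : (if B[k] ∈ PySem.Set.ofList (A.take (k + 1))
          then (((B.take k).countP (fun b => decide (b ∈ A.take k))) : Int)
                 + (if A[k] ∈ A.take k then 0 else ((B.take k).count A[k] : Int)) + 1
          else (((B.take k).countP (fun b => decide (b ∈ A.take k))) : Int)
                 + (if A[k] ∈ A.take k then 0 else ((B.take k).count A[k] : Int)))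
        = pvG A B k := by
      rw [pv_step A B k hkA hkB]
      by_cases h : B[k] ∈ A.take (k + 1)
      · rw [if_pos ((hmem2).mpr h), if_pos h]
      · rw [if_neg (fun hc => h ((hmem2).mp hc)), if_neg h]; ring
    rw [hdict, hcommon2]
    refine congrArg _ (congrArg _ (congrArg₂ _ ?_ ?_))
    · unfold pvG; rfl
    · rw [List.range_succ, List.map_append]; rfl


-- ===== VERDICT (by name: the statement is the Claim_ definition above) =====
theorem findThePrefixCommonArray_spec : Claim_equal_findThePrefixCommonArray := by
  intro A B _ hP
  unfold Spec_findThePrefixCommonArray findThePrefixCommonArray findThePrefixCommonArray_alt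
  dsimp only
  rw [pv_foldA A B hP A.length le_rfl]
  have hB := pv_foldB A B hP A.length le_rfl
  rw [List.take_length] at hB
  rw [pv_zip_take A B, hB]
  simp
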